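-- pv_equiv track=rewrite | github.com/nithyapranavs/Classic-crypto-py | freqAnalysis.py | englishFreqMatchScore
-- ===== SOURCE A (Python) =====
-- ETAOIN = 'ETAOINSHRDLCUMWFGYPBVKJXQZ'
--
-- LETTERS = 'ABCDEFGHIJKLMNOPQRSTUVWXYZ'
--
-- def getLetterCount(message):
--     '''Returns dictionary with how many time the
--     letter has appeared'''
--     letterCount = {'A': 0, 'B': 0, 'C': 0, 'D': 0, 'E': 0, 'F': 0, 'G': 0,
--                    'H': 0, 'I': 0, 'J': 0, 'K': 0, 'L': 0, 'M': 0, 'N': 0,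
--                    'O': 0, 'P': 0, 'Q': 0, 'R': 0, 'S': 0, 'T': 0, 'U': 0,
--                    'V': 0, 'W': 0, 'X': 0, 'Y': 0, 'Z': 0}
--
--     for letter in message.upper():
--         if letter in LETTERS:
--             letterCount[letter] += 1
--
--     return letterCount
--
-- def getItemAtIndexZero(x):
--     return x[0]
--
-- def getFrequencyOrder(message):
--     '''Returns a string of letters arranged in order of
--     most frequently occuring in the message'''
--
--     letterToFreq = getLetterCount(message)
--     #key = letter , value = freq
--
--     freqToLetter = {}
--     #key = freq, value = [letter1, letter2]
--
--     for letter in LETTERS: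
--         if letterToFreq[letter] not in freqToLetter:
--             freqToLetter[letterToFreq[letter]] = [letter]
--         else:
--             freqToLetter[letterToFreq[letter]].append(letter)
--
--     #loop changes the letters list to string
--     #eg: val = ['a','b'] -> 'ab'
--     for freq in freqToLetter:
--         freqToLetter[freq].sort(key = ETAOIN.find, reverse = True)
--         freqToLetter[freq] = ''.join(freqToLetter[freq])
--
--     #dict to list of tubles
--     #eg: [(1,'ab'),(2,'c')]
--     freqPairs = list(freqToLetter.items())
--     freqPairs.sort(key = getItemAtIndexZero, reverse = True)
--
--     freqOrder = []
--     for freqPair in freqPairs: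
--         freqOrder.append(freqPair[1])
--
--     return ''.join(freqOrder)
--
-- def englishFreqMatchScore(message):
--     '''Reutrns number of matches of the message
--     with ETAOIN letters comparing with the first
--     and the last six frequent letters'''
--     freqOrder = getFrequencyOrder(message)
--
--     matchScore = 0
--
--     #finding matches of first six common letters
--     for commonLetter in ETAOIN[:6]:
--         if commonLetter in freqOrder[:6]:
--             matchScore += 1
--
--     #finding matches of least six common letters
--     for commonLetter in ETAOIN[-6:]:
--         if commonLetter in freqOrder[-6:]:
--             matchScore += 1
--
--     return matchScore
-- ===== SOURCE B (Python) =====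
-- ETAOIN = 'ETAOINSHRDLCUMWFGYPBVKJXQZ'
-- LETTERS = 'ABCDEFGHIJKLMNOPQRSTUVWXYZ'
--
-- def englishFreqMatchScore(message):
--     count = dict.fromkeys(LETTERS, 0)
--     for ch in message.upper():
--         if ch in LETTERS:
--             count[ch] += 1
--     freqOrder = ''.join(sorted(LETTERS,
--                                key=lambda L: (count[L], ETAOIN.find(L)),
--                                reverse=True))
--     score = sum(c in freqOrder[:6] for c in ETAOIN[:6])
--     score += sum(c in freqOrder[-6:] for c in ETAOIN[-6:])
--     return score
-- ===== Notes on version B (the rewrite author's own statement) =====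
-- stated objective: simpler
-- what changed: Replaces A's group-counts-into-a-dict-of-buckets / sort-each-bucket / sort-the-(freq,string)-pairs / concatenate pipeline by a single sort of the 26 letters under the composite key (count, ETAOIN.find) with reverse=True, and folds the two scoring loops into sum() one-liners.
import Mathlib
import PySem

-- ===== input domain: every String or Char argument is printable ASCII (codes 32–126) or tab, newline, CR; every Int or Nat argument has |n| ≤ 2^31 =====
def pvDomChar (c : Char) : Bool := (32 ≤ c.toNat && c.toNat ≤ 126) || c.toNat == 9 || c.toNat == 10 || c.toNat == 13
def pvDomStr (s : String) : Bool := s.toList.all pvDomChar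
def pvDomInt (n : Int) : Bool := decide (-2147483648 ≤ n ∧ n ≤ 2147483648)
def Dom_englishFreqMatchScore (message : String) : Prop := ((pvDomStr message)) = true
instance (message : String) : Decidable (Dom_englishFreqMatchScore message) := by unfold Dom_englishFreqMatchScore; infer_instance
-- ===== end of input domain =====

-- B replaces A's bucket-dict / per-bucket-sort / pair-sort pipeline by ONE sort of the 26 letters
-- under the composite key (count, ETAOIN.find) with reverse=True (objective: simpler).

-- ===== PORT A =====
def pvEtaoin : List Char := "ETAOINSHRDLCUMWFGYPBVKJXQZ".toList
def pvLetters : List Char := "ABCDEFGHIJKLMNOPQRSTUVWXYZ".toList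

-- ETAOIN.find(letter) for a one-character string
def pvFind (c : Char) : Int := PySem.Chars.find pvEtaoin [c]

-- the dict literal initialising letterCount
def pvLetterCount0 : PySem.Dict Char Int := PySem.Dict.mk
  [('A',0),('B',0),('C',0),('D',0),('E',0),('F',0),('G',0),('H',0),('I',0),('J',0),('K',0),('L',0),('M',0),
   ('N',0),('O',0),('P',0),('Q',0),('R',0),('S',0),('T',0),('U',0),('V',0),('W',0),('X',0),('Y',0),('Z',0)]

-- letterCount[letter] += 1 reads an always-present key (the dict holds all of LETTERS), so it is insert letter (getD letter 0 + 1)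
def pvGetLetterCount (message : String) : PySem.Dict Char Int :=
  (PySem.Str.upper message).toList.foldl
    (fun d letter =>
      if PySem.Chars.isIn [letter] pvLetters then d.insert letter (d.getD letter 0 + 1) else d)
    pvLetterCount0

def pvGetItemAtIndexZero (x : Int × List Char) : Int := x.1

def pvGetFrequencyOrder (message : String) : List Char :=
  let letterToFreq := pvGetLetterCount message
  -- letterToFreq[letter] is always present, so it is getD letter 0
  let freqToLetter : PySem.Dict Int (List Char) :=
    pvLetters.foldl
      (fun d letter =>
        if d.contains (letterToFreq.getD letter 0) = false then
          d.insert (letterToFreq.getD letter 0) [letter]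
        else
          d.modify (letterToFreq.getD letter 0) [] (fun l => l ++ [letter]))
      PySem.Dict.empty
  -- for freq in freqToLetter: sort the bucket, join it; each value replaced in place at its own key, keys unchanged
  let freqToLetter2 : PySem.Dict Int (List Char) :=
    PySem.Dict.mk (freqToLetter.items.map (fun p => (p.1, PySem.List.sorted p.2 pvFind true)))
  let freqPairs := PySem.List.sorted freqToLetter2.items pvGetItemAtIndexZero true
  let freqOrder := freqPairs.foldl (fun acc p => acc ++ [p.2]) []
  freqOrder.flatten   -- ''.join(freqOrder)

def englishFreqMatchScore (message : String) : Int :=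
  let freqOrder := pvGetFrequencyOrder message
  let m1 := (PySem.List.slice pvEtaoin none (some 6)).foldl
      (fun m c => if PySem.Chars.isIn [c] (PySem.List.slice freqOrder none (some 6)) then m + 1 else m) 0
  (PySem.List.slice pvEtaoin (some (-6)) none).foldl
      (fun m c => if PySem.Chars.isIn [c] (PySem.List.slice freqOrder (some (-6)) none) then m + 1 else m) m1

-- ===== PORT B =====
def englishFreqMatchScore_alt (message : String) : Int :=
  let count := (PySem.Str.upper message).toList.foldl
      (fun d ch => if PySem.Chars.isIn [ch] pvLetters then d.insert ch (d.getD ch 0 + 1) else d)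
      (pvLetters.foldl (fun d L => d.insert L (0 : Int)) PySem.Dict.empty)   -- dict.fromkeys(LETTERS, 0)
  let freqOrder := PySem.List.sorted2 pvLetters (fun L => count.getD L 0) pvFind true
  let s1 := ((PySem.List.slice pvEtaoin none (some 6)).map
      (fun c => if PySem.Chars.isIn [c] (PySem.List.slice freqOrder none (some 6)) then (1 : Int) else 0)).sum
  s1 + ((PySem.List.slice pvEtaoin (some (-6)) none).map
      (fun c => if PySem.Chars.isIn [c] (PySem.List.slice freqOrder (some (-6)) none) then (1 : Int) else 0)).sum

-- ===== PRECONDITION & SPEC =====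
def Spec_englishFreqMatchScore (message : String) (out : Int) : Prop := out = englishFreqMatchScore_alt message
instance (message : String) (out : Int) : Decidable (Spec_englishFreqMatchScore message out) := by unfold Spec_englishFreqMatchScore; infer_instance

-- ===== CLAIM (what is proved, stated in full; the proofs are below) =====
def Claim_equal_englishFreqMatchScore : Prop := ∀ (message : String), Dom_englishFreqMatchScore message → Spec_englishFreqMatchScore message (englishFreqMatchScore message)

-- ===== LEMMAS AND PROOFS =====

-- the strict "comes strictly earlier in the reverse composite sort" test of B's sort
def pvLt (f : Char → Int) (a b : Char) : Bool :=
  decide (f a < f b) || (!decide (f b < f a) && decide (pvFind a < pvFind b))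

def pvBefore (f : Char → Int) (a b : Char) : Bool := pvLt f b a

theorem pvLt_asym (f : Char → Int) (a b : Char) (h : pvLt f a b = true) : pvLt f b a = false := by
  simp only [pvLt, Bool.or_eq_true, Bool.and_eq_true, Bool.not_eq_true', Bool.not_eq_false', decide_eq_true_iff,
    decide_eq_false_iff_not, Bool.or_eq_false_iff, Bool.and_eq_false_iff] at *
  omega

theorem pvBefore_negtrans (f : Char → Int) (a b c : Char)
    (h1 : pvBefore f a b = false) (h2 : pvBefore f b c = false) : pvBefore f a c = false := by
  simp only [pvBefore, pvLt, Bool.or_eq_false_iff, Bool.and_eq_false_iff, Bool.not_eq_false',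
    decide_eq_true_iff, decide_eq_false_iff_not] at *
  omega

theorem insertBy_pw (before : Char → Char → Bool)
    (hA : ∀ a b, before a b = true → before b a = false)
    (hN : ∀ a b c, before a b = false → before b c = false → before a c = false)
    (x : Char) (acc : List Char) (h : acc.Pairwise (fun a b => before b a = false)) :
    (PySem.List.insertBy before x acc).Pairwise (fun a b => before b a = false) := by
  induction acc with
  | nil => simp [PySem.List.insertBy]
  | cons y ys ih =>
    rw [PySem.List.insertBy]
    rcases List.pairwise_cons.mp h with ⟨hy, hys⟩
    cases hxy : before x y with
    | true =>
      refine List.pairwise_cons.mpr ⟨?_, h⟩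
      intro z hz
      rcases List.mem_cons.mp hz with rfl | hz'
      · exact hA x z hxy
      · exact hN z y x (hy z hz') (hA x y hxy)
    | false =>
      simp only [Bool.false_eq_true, if_false]
      refine List.pairwise_cons.mpr ⟨?_, ih hys⟩
      intro w hw
      rcases (PySem.List.mem_insertBy before x w ys).mp hw with rfl | hw'
      · exact hxy
      · exact hy w hw' 

theorem foldl_insertBy_pw (before : Char → Char → Bool)
    (hA : ∀ a b, before a b = true → before b a = false)
    (hN : ∀ a b c, before a b = false → before b c = false → before a c = false)
    (xs acc : List Char) (h : acc.Pairwise (fun a b => before b a = false)) :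
    (xs.foldl (fun acc x => PySem.List.insertBy before x acc) acc).Pairwise
      (fun a b => before b a = false) := by
  induction xs generalizing acc with
  | nil => exact h
  | cons x xs ih => exact ih _ (insertBy_pw before hA hN x acc h)

theorem sorted_unique (before : Char → Char → Bool) :
    ∀ (ys r : List Char), r.Perm ys → r.Pairwise (fun a b => before b a = false) →
    ys.Pairwise (fun a b => before a b = true) → ys.Nodup → r = ys := by
  intro ys
  induction ys with
  | nil => intro r hperm _ _ _; exact hperm.eq_nil
  | cons y ys ih =>
    intro r hperm hr hys hnd
    cases r with
    | nil => exact absurd hperm.symm.eq_nil (by simp)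
    | cons z r' =>
      by_cases hzy : z = y
      · subst hzy
        have := ih r' (hperm.cons_inv) (List.pairwise_cons.mp hr).2
          (List.pairwise_cons.mp hys).2 (List.nodup_cons.mp hnd).2
        rw [this]
      · exfalso
        have hyr : y ∈ z :: r' := hperm.mem_iff.mpr (List.mem_cons_self)
        have hyr' : y ∈ r' := by
          rcases List.mem_cons.mp hyr with h1 | h1
          · exact absurd h1.symm hzy
          · exact h1
        have hzys : z ∈ ys := by
          have : z ∈ y :: ys := hperm.subset (List.mem_cons_self)
          rcases List.mem_cons.mp this with h1 | h1
          · exact absurd h1 hzy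
          · exact h1
        have h1 : before y z = false := (List.pairwise_cons.mp hr).1 y hyr'
        have h2 : before y z = true := (List.pairwise_cons.mp hys).1 z hzys
        rw [h1] at h2; exact Bool.false_ne_true h2

-- group-by partition: flatMapping the filters over the distinct values is a permutation
theorem groupby_perm (f : Char → Int) :
    ∀ (vs : List Int) (xs : List Char), vs.Nodup → (∀ x ∈ xs, f x ∈ vs) →
    (vs.flatMap (fun v => xs.filter (fun c => f c == v))).Perm xs := by
  intro vs
  induction vs with
  | nil =>
    intro xs _ hmem
    cases xs with
    | nil => simp
    | cons x xs => exact absurd (hmem x List.mem_cons_self) (by simp)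
  | cons v vs ih =>
    intro xs hnd hmem
    rw [List.flatMap_cons]
    have hvnotin : v ∉ vs := (List.nodup_cons.mp hnd).1
    have hstep : ∀ w ∈ vs, xs.filter (fun c => f c == w)
        = (xs.filter (fun c => !(f c == v))).filter (fun c => f c == w) := by
      intro w hw
      rw [List.filter_filter]
      refine (List.filter_congr ?_).symm
      intro c _
      by_cases hcw : f c = w
      · have hwv : (w == v) = false := by
          simp only [beq_eq_false_iff_ne]; exact fun h => hvnotin (h ▸ hw)
        simp [hcw, hwv]
      · simp [hcw]
    have hflat : vs.flatMap (fun w => xs.filter (fun c => f c == w))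
        = vs.flatMap (fun w => (xs.filter (fun c => !(f c == v))).filter (fun c => f c == w)) := by
      simp only [List.flatMap]
      exact congrArg List.flatten (List.map_congr_left hstep)
    rw [hflat]
    have hperm' := ih (xs.filter (fun c => !(f c == v))) (List.nodup_cons.mp hnd).2 ?_
    · exact ((hperm'.append_left (xs.filter (fun c => f c == v)))).trans
        (List.filter_append_perm _ xs)
    · intro x hx
      rcases List.mem_filter.mp hx with ⟨hx1, hx2⟩
      have := hmem x hx1
      rcases List.mem_cons.mp this with h1 | h1
      · exact absurd h1 (by simpa using hx2)
      · exact h1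

set_option maxRecDepth 4000 in
theorem letters_nodup : pvLetters.Nodup := by decide

set_option maxRecDepth 4000 in
theorem find_vals : pvLetters.map pvFind
    = [2, 19, 11, 9, 0, 15, 16, 7, 4, 22, 21, 10, 13, 5, 3, 18, 24, 8, 6, 1, 12, 20, 14, 23, 17, 25] := by rfl

theorem find_inj : ∀ a ∈ pvLetters, ∀ b ∈ pvLetters, pvFind a = pvFind b → a = b := by
  have h : (pvLetters.map pvFind).Nodup := by rw [find_vals]; decide
  exact fun a ha b hb => List.inj_on_of_nodup_map h ha hb

-- A's dict pipeline, abstracted over the letter-count function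
def pvPipeline (f : Char → Int) : List Char :=
  ((PySem.List.sorted
      (PySem.Dict.mk
        ((pvLetters.foldl
            (fun d letter =>
              if d.contains (f letter) = false then d.insert (f letter) [letter]
              else d.modify (f letter) [] (fun l => l ++ [letter]))
            PySem.Dict.empty).items.map
          (fun p => (p.1, PySem.List.sorted p.2 pvFind true)))).items
      pvGetItemAtIndexZero true).foldl
    (fun acc p => acc ++ [p.2]) []).flatten

theorem items_mk (l : List (Int × List Char)) : (PySem.Dict.mk l).items = l := rfl

-- the core: A's dict pipeline over any counts equals B's single composite sort
theorem core (f : Char → Int) :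
    pvPipeline f = PySem.List.sorted2 pvLetters f pvFind true := by
  have hstep : (fun (d : PySem.Dict Int (List Char)) letter =>
      if d.contains (f letter) = false then d.insert (f letter) [letter]
      else d.modify (f letter) [] (fun l => l ++ [letter]))
      = fun d letter => d.modify (f letter) [] (fun l => l ++ [letter]) := by
    funext d c
    cases hc : d.contains (f c) with
    | false => simp [PySem.Dict.modify, PySem.Dict.getD_of_not_contains d [] hc]
    | true => simp
  obtain ⟨W, hWdef⟩ : ∃ w, PySem.Set.ofList (pvLetters.map f) = w := ⟨_, rfl⟩
  obtain ⟨dG, hdGdef⟩ : ∃ d, pvLetters.foldl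
      (fun d letter =>
        if d.contains (f letter) = false then d.insert (f letter) [letter]
        else d.modify (f letter) [] (fun l => l ++ [letter]))
      PySem.Dict.empty = d := ⟨_, rfl⟩
  have hdGdef' : pvLetters.foldl
      (fun d letter => d.modify (f letter) [] (fun l => l ++ [letter])) PySem.Dict.empty = dG := by
    rw [← hdGdef, hstep]
  have hkeys : dG.keys = W := by
    rw [← hdGdef', PySem.Dict.keys_foldl_modify_key pvLetters f [] (fun _ x => (fun l => l ++ [x]))
      PySem.Dict.empty]
    rw [show (PySem.Dict.empty : PySem.Dict Int (List Char)).keys = PySem.Set.empty from rfl,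
      PySem.Set.update_empty, hWdef]
  have hWnodup : W.Nodup := by rw [← hWdef]; exact PySem.Set.nodup_ofList _
  have hnd : dG.keys.Nodup := by rw [hkeys]; exact hWnodup
  have hget : ∀ v, dG.getD v [] = pvLetters.filter (fun c => f c == v) := by
    intro v
    rw [← hdGdef', ← List.foldl_map (f := fun c => (f c, c))
      (g := fun (d : PySem.Dict Int (List Char)) (p : Int × Char) => d.modify p.1 [] (fun l => l ++ [p.2]))
      (l := pvLetters) (init := PySem.Dict.empty)]
    rw [PySem.Dict.getD_foldl_modify_append]
    simp [PySem.Dict.getD_empty, List.filter_map, List.map_map, Function.comp_def]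
  have hitems : dG.items.map (fun p => (p.1, PySem.List.sorted p.2 pvFind true))
      = W.map (fun v => (v, PySem.List.sorted (pvLetters.filter (fun c => f c == v)) pvFind true)) := by
    rw [PySem.Dict.items_eq_map_keys dG hnd [], hkeys, List.map_map]
    refine List.map_congr_left (fun v _ => ?_)
    simp only [Function.comp_def]
    rw [hget v]
  -- rewrite the goal into an opaque sorted pair list
  unfold pvPipeline
  rw [hdGdef, items_mk, hitems]
  obtain ⟨SP, hSP⟩ : ∃ sp, PySem.List.sorted
      (W.map (fun v => (v, PySem.List.sorted (pvLetters.filter (fun c => f c == v)) pvFind true)))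
      pvGetItemAtIndexZero true = sp := ⟨_, rfl⟩
  rw [hSP, show ∀ l : List (Int × List Char), l.foldl (fun acc p => acc ++ [p.2]) [] = l.map (fun p => p.2)
    from fun l => PySem.List.foldl_append_singleton_eq_map (fun p => p.2) l []]
  -- facts about SP
  have hSPperm : SP.Perm (W.map (fun v =>
      (v, PySem.List.sorted (pvLetters.filter (fun c => f c == v)) pvFind true))) := by
    rw [← hSP]; exact PySem.List.sorted_perm _ _ _
  have hmemSP : ∀ p ∈ SP, ∃ v,
      p = (v, PySem.List.sorted (pvLetters.filter (fun c => f c == v)) pvFind true) := by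
    intro p hp
    rcases List.mem_map.mp (hSPperm.subset hp) with ⟨v, _, hpv⟩
    exact ⟨v, hpv.symm⟩
  have hchar : ∀ p ∈ SP, ∀ x ∈ p.2, f x = p.1 ∧ x ∈ pvLetters := by
    intro p hp x hx
    rcases hmemSP p hp with ⟨v, rfl⟩
    have hx' := (PySem.List.mem_sorted _ _ _ x).mp hx
    rcases List.mem_filter.mp hx' with ⟨hx1, hx2⟩
    exact ⟨by simpa using hx2, hx1⟩
  have hfstle : SP.Pairwise (fun p q => q.1 ≤ p.1) := by
    rw [← hSP]
    exact PySem.List.sorted_pairwise_rev _ pvGetItemAtIndexZero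
  have hfstnd : (SP.map (fun p => p.1)).Nodup := by
    refine ((List.Perm.map (fun p : Int × List Char => p.1) hSPperm).nodup_iff).mpr ?_
    rw [List.map_map]
    simpa [Function.comp_def] using hWnodup
  have hfstlt : SP.Pairwise (fun p q => q.1 < p.1) := by
    have hne : SP.Pairwise (fun p q => p.1 ≠ q.1) :=
      List.pairwise_map.mp (List.nodup_iff_pairwise_ne.mp hfstnd)
    exact (hfstle.and hne).imp (fun h => lt_of_le_of_ne h.1 (Ne.symm h.2))
  -- ys := the flattened buckets
  have hyperm : ((SP.map (fun p => p.2)).flatten).Perm pvLetters := by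
    have h2 : ((SP.map (fun p => p.2)).flatten).Perm
        (W.flatMap (fun v => PySem.List.sorted (pvLetters.filter (fun c => f c == v)) pvFind true)) := by
      rw [List.flatMap_def,
        show (W.map (fun v => PySem.List.sorted (pvLetters.filter (fun c => f c == v)) pvFind true))
          = (W.map (fun v => (v, PySem.List.sorted (pvLetters.filter (fun c => f c == v)) pvFind true))).map
              (fun p => p.2) by rw [List.map_map]; rfl]
      exact List.Perm.flatten (List.Perm.map _ hSPperm)
    have h3 : (W.flatMap (fun v => PySem.List.sorted (pvLetters.filter (fun c => f c == v)) pvFind true)).Perm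
        (W.flatMap (fun v => pvLetters.filter (fun c => f c == v))) :=
      List.Perm.flatMap (List.Perm.refl W) (fun v _ => PySem.List.sorted_perm _ _ _)
    refine (h2.trans h3).trans ?_
    refine groupby_perm f W pvLetters hWnodup ?_
    intro c hc
    rw [← hWdef]
    exact (PySem.Set.mem_ofList _ _).mpr (List.mem_map.mpr ⟨c, hc, rfl⟩)
  have hyspw : ((SP.map (fun p => p.2)).flatten).Pairwise (fun a b => pvBefore f a b = true) := by
    rw [List.pairwise_flatten]
    constructor
    · intro l hl
      rcases List.mem_map.mp hl with ⟨p, hp, rfl⟩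
      rcases hmemSP p hp with ⟨v, rfl⟩
      have hle : (PySem.List.sorted (pvLetters.filter (fun c => f c == v)) pvFind true).Pairwise
          (fun a b => pvFind b ≤ pvFind a) := PySem.List.sorted_pairwise_rev _ pvFind
      have hndl : (PySem.List.sorted (pvLetters.filter (fun c => f c == v)) pvFind true).Nodup :=
        ((PySem.List.sorted_perm _ _ _).nodup_iff).mpr (letters_nodup.filter _)
      have hne := List.nodup_iff_pairwise_ne.mp hndl
      refine (hle.and hne).imp_of_mem ?_
      intro a b ha hb hab
      have hamem := (PySem.List.mem_sorted _ _ _ a).mp ha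
      have hbmem := (PySem.List.mem_sorted _ _ _ b).mp hb
      rcases List.mem_filter.mp hamem with ⟨ha1, ha2⟩
      rcases List.mem_filter.mp hbmem with ⟨hb1, hb2⟩
      have hfa : f a = v := by simpa using ha2
      have hfb : f b = v := by simpa using hb2
      have hfind : pvFind b < pvFind a :=
        lt_of_le_of_ne hab.1 (fun h => hab.2 (find_inj b hb1 a ha1 h).symm)
      simp only [pvBefore, pvLt, Bool.or_eq_true, Bool.and_eq_true, decide_eq_true_iff,
        Bool.not_eq_true', decide_eq_false_iff_not]
      right
      exact ⟨by omega, hfind⟩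
    · rw [List.pairwise_map]
      refine hfstlt.imp_of_mem ?_
      intro p q hp hq hlt x hx y hy
      have h1 := hchar p hp x hx
      have h2 := hchar q hq y hy
      simp only [pvBefore, pvLt, Bool.or_eq_true, decide_eq_true_iff]
      left
      omega
  -- B's sort is the fold of insertions; conclude by uniqueness
  have hr : PySem.List.sorted2 pvLetters f pvFind true
      = pvLetters.foldl (fun acc x => PySem.List.insertBy (pvBefore f) x acc) [] := rfl
  have hA' : ∀ a b, pvBefore f a b = true → pvBefore f b a = false :=
    fun a b h => pvLt_asym f b a h
  have hN' : ∀ a b c, pvBefore f a b = false → pvBefore f b c = false → pvBefore f a c = false :=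
    pvBefore_negtrans f
  have hrpw := foldl_insertBy_pw (pvBefore f) hA' hN' pvLetters [] (List.Pairwise.nil)
  have hrperm : (pvLetters.foldl (fun acc x => PySem.List.insertBy (pvBefore f) x acc) []).Perm
      ((SP.map (fun p => p.2)).flatten) := by
    have h := PySem.List.foldl_insertBy_perm (pvBefore f) pvLetters []
    simpa using h.trans hyperm.symm
  have hynd : ((SP.map (fun p => p.2)).flatten).Nodup := (hyperm.nodup_iff).mpr letters_nodup
  rw [hr]
  exact (sorted_unique (pvBefore f) _ _ hrperm hrpw hyspw hynd).symm

theorem counts_eq (message : String) :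
    (PySem.Str.upper message).toList.foldl
      (fun d ch => if PySem.Chars.isIn [ch] pvLetters then d.insert ch (d.getD ch 0 + 1) else d)
      (pvLetters.foldl (fun d L => d.insert L (0 : Int)) PySem.Dict.empty)
    = pvGetLetterCount message := by
  have h : (pvLetters.foldl (fun d L => d.insert L (0 : Int)) PySem.Dict.empty) = pvLetterCount0 := by
    decide
  rw [h]; rfl

-- A's and B's scoring passes, abstracted over freqOrder
def pvScoreA (fo : List Char) : Int :=
  let m1 := (PySem.List.slice pvEtaoin none (some 6)).foldl
      (fun m c => if PySem.Chars.isIn [c] (PySem.List.slice fo none (some 6)) then m + 1 else m) 0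
  (PySem.List.slice pvEtaoin (some (-6)) none).foldl
      (fun m c => if PySem.Chars.isIn [c] (PySem.List.slice fo (some (-6)) none) then m + 1 else m) m1

def pvScoreB (fo : List Char) : Int :=
  ((PySem.List.slice pvEtaoin none (some 6)).map
      (fun c => if PySem.Chars.isIn [c] (PySem.List.slice fo none (some 6)) then (1 : Int) else 0)).sum
  + ((PySem.List.slice pvEtaoin (some (-6)) none).map
      (fun c => if PySem.Chars.isIn [c] (PySem.List.slice fo (some (-6)) none) then (1 : Int) else 0)).sum

theorem score_eq (fo : List Char) : pvScoreA fo = pvScoreB fo := by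
  simp only [pvScoreA, pvScoreB, PySem.List.foldl_count_if, PySem.List.sum_map_ite_one_zero]
  omega

theorem a_as_pipeline (message : String) :
    englishFreqMatchScore message
    = pvScoreA (pvPipeline (fun L => (pvGetLetterCount message).getD L 0)) := by
  unfold englishFreqMatchScore pvGetFrequencyOrder pvScoreA pvPipeline
  dsimp only

theorem b_as_sorted (message : String) :
    englishFreqMatchScore_alt message
    = pvScoreB (PySem.List.sorted2 pvLetters
        (fun L => ((PySem.Str.upper message).toList.foldl
          (fun d ch => if PySem.Chars.isIn [ch] pvLetters then d.insert ch (d.getD ch 0 + 1) else d)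
          (pvLetters.foldl (fun d L => d.insert L (0 : Int)) PySem.Dict.empty)).getD L 0)
        pvFind true) := rfl

-- ===== VERDICT (by name: the statement is the Claim_ definition above) =====
theorem englishFreqMatchScore_spec : Claim_equal_englishFreqMatchScore := by
  intro message _
  unfold Spec_englishFreqMatchScore
  rw [a_as_pipeline, b_as_sorted, counts_eq, core, score_eq]
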